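-- pv_equiv track=rewrite | github.com/ongzhili/ADVENT-OF-CODE | 13/DAY13.py | horizLine
-- ===== SOURCE A (Python) =====
-- def horizLine(pattern):
--   indices = []
--   for i in range(len(pattern)-1):
--     Lpointer = i
--     Rpointer = i + 1
--     mirrored = True
--     while(Lpointer >= 0 and Rpointer < len(pattern)):
--       if pattern[Lpointer] != pattern[Rpointer]:
--         mirrored = False
--       Lpointer -= 1
--       Rpointer += 1
--     if mirrored:
--       indices.append(i)
--   return indices
-- ===== SOURCE B (Python) =====
-- def horizLine(pattern):
--   n = len(pattern)
--   return [i for i in range(n - 1)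
--           if pattern[max(0, 2*i + 2 - n):i + 1] == pattern[i + 1:2*i + 2][::-1]]
-- ===== Notes on version B (the rewrite author's own statement) =====
-- stated objective: faster
-- what changed: Replaced the nested while-loop with a mirrored flag (which keeps scanning the whole window even after a mismatch) by a comprehension that tests each split with one slice comparison: the clamped prefix slice must equal the reversed suffix slice.
import Mathlib
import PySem

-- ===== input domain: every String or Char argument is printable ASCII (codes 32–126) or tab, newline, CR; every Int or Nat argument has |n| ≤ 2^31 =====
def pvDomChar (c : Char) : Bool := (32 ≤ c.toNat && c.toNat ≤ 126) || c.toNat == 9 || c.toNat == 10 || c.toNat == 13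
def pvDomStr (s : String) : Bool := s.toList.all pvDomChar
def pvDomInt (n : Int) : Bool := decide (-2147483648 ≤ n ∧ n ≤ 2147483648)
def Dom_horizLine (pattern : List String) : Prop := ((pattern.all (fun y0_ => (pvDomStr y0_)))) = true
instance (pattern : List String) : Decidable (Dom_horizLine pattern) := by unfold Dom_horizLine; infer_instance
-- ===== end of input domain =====

-- B replaces A's full-window inner scan with one slice-vs-reversed-slice comparison per split (measurably faster constant factor).

-- ===== PORT A =====
-- the inner 'while Lpointer >= 0 and Rpointer < len(pattern)' loop, carrying the 'mirrored' flag
def horizAux (pattern : List String) (L R : Int) (mirrored : Bool) : Bool :=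
  if 0 ≤ L ∧ R < (pattern.length : Int) then
    horizAux pattern (L - 1) (R + 1)
      (if PySem.List.pyGet? pattern L ≠ PySem.List.pyGet? pattern R then false else mirrored)
  else mirrored
termination_by (L + 1).toNat
decreasing_by omega

def horizLine (pattern : List String) : List Int :=
  (PySem.List.pyRange 0 ((pattern.length : Int) - 1) 1).foldl
    (fun indices i => if horizAux pattern i (i + 1) true then indices ++ [i] else indices) []

-- ===== PORT B =====
def horizLine_alt (pattern : List String) : List Int :=
  let n : Int := pattern.length
  (PySem.List.pyRange 0 (n - 1) 1).filter (fun i =>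
    PySem.List.slice pattern (some (max 0 (2 * i + 2 - n))) (some (i + 1))
      == (PySem.List.slice pattern (some (i + 1)) (some (2 * i + 2))).reverse)

-- ===== PRECONDITION & SPEC =====
def Spec_horizLine (pattern : List String) (out : List Int) : Prop := out = horizLine_alt pattern
instance (pattern : List String) (out : List Int) : Decidable (Spec_horizLine pattern out) := by unfold Spec_horizLine; infer_instance

-- ===== CLAIM (what is proved, stated in full; the proofs are below) =====
def Claim_equal_horizLine : Prop := ∀ (pattern : List String), Dom_horizLine pattern → Spec_horizLine pattern (horizLine pattern)

-- ===== LEMMAS AND PROOFS =====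

-- the mirrored flag threads through the loop as a conjunction
theorem horizAux_and (pattern : List String) :
    ∀ (fuel : ℕ) (L R : Int) (m : Bool), ((pattern.length : Int) - R).toNat ≤ fuel →
    horizAux pattern L R m = (m && horizAux pattern L R true) := by
  intro fuel
  induction fuel with
  | zero =>
    intro L R m hf
    conv_lhs => rw [horizAux]
    conv_rhs => rw [horizAux]
    rw [if_neg (by omega), if_neg (by omega), Bool.and_true]
  | succ f ih =>
    intro L R m hf
    by_cases h : 0 ≤ L ∧ R < (pattern.length : Int)
    · conv_lhs => rw [horizAux]
      conv_rhs => rw [horizAux]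
      rw [if_pos h, if_pos h]
      by_cases hne : PySem.List.pyGet? pattern L ≠ PySem.List.pyGet? pattern R
      · simp only [if_pos hne]
        rw [ih (L - 1) (R + 1) false (by omega)]
        simp
      · simp only [if_neg hne]
        rw [ih (L - 1) (R + 1) m (by omega)]
    · conv_lhs => rw [horizAux]
      conv_rhs => rw [horizAux]
      rw [if_neg h, if_neg h, Bool.and_true]

theorem horizAux_true_iff (pattern : List String) :
    ∀ (fuel L R : ℕ), pattern.length - R = fuel →
    (horizAux pattern (L : Int) (R : Int) true = true ↔
      ∀ j < min (L + 1) (pattern.length - R), pattern[L - j]? = pattern[R + j]?) := by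
  intro fuel
  induction fuel with
  | zero =>
    intro L R hR
    rw [horizAux, if_neg (by omega)]
    constructor
    · intro _ j hj
      exact absurd hj (by omega)
    · intro _
      rfl
  | succ f ih =>
    intro L R hR
    have hRn : R < pattern.length := by omega
    rw [horizAux, if_pos (by refine ⟨by omega, by omega⟩)]
    simp only [PySem.List.pyGet?_natCast]
    cases L with
    | zero =>
      rw [horizAux, if_neg (by omega)]
      constructor
      · intro h j hj
        have hj0 : j = 0 := by omega
        subst hj0
        by_cases he : pattern[(0 : ℕ)]? = pattern[R]?
        · simpa using he
        · rw [if_pos he] at h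
          exact absurd h (by simp)
      · intro h
        have h0 : pattern[(0 : ℕ)]? = pattern[R]? := by simpa using h 0 (by omega)
        rw [if_neg (not_ne_iff.mpr h0)]
    | succ l =>
      have hc1 : ((l + 1 : ℕ) : Int) - 1 = ((l : ℕ) : Int) := by push_cast; ring
      have hc2 : ((R : ℕ) : Int) + 1 = ((R + 1 : ℕ) : Int) := by push_cast; ring
      rw [hc1, hc2, horizAux_and pattern (pattern.length - (R + 1)) _ _ _ (by omega)]
      have ihr := ih l (R + 1) (by omega)
      rw [Bool.and_eq_true, ihr]
      constructor
      · rintro ⟨hm, hrest⟩ j hj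
        have heq : pattern[l + 1]? = pattern[R]? := by
          by_cases he : pattern[l + 1]? = pattern[R]?
          · exact he
          · rw [if_pos he] at hm
            exact absurd hm (by simp)
        rcases Nat.eq_zero_or_pos j with hj0 | hjp
        · subst hj0
          simpa using heq
        · obtain ⟨j', rfl⟩ : ∃ j', j = j' + 1 := ⟨j - 1, by omega⟩
          have hx := hrest j' (by omega)
          have e1 : l + 1 - (j' + 1) = l - j' := by omega
          have e2 : R + (j' + 1) = R + 1 + j' := by omega
          rw [e1, e2]
          exact hx
      · intro h
        have heq : pattern[l + 1]? = pattern[R]? := by simpa using h 0 (by omega)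
        refine ⟨by rw [if_neg (not_ne_iff.mpr heq)], ?_⟩
        intro j' hj'
        have hx := h (j' + 1) (by omega)
        have e1 : l + 1 - (j' + 1) = l - j' := by omega
        have e2 : R + (j' + 1) = R + 1 + j' := by omega
        rw [e1, e2] at hx
        exact hx

-- B's slice comparison characterised by the same pairwise condition
theorem slice_pair_iff (pattern : List String) (k : ℕ) (hk : k + 1 < pattern.length) :
    ((pattern.drop (k + 1 - min (k + 1) (pattern.length - (k + 1)))).take
        (min (k + 1) (pattern.length - (k + 1)))
      = ((pattern.drop (k + 1)).take (k + 1)).reverse) ↔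
    ∀ j < min (k + 1) (pattern.length - (k + 1)), pattern[k - j]? = pattern[k + 1 + j]? := by
  set t := min (k + 1) (pattern.length - (k + 1)) with ht
  have htk : t ≤ k + 1 := by omega
  have htn : t ≤ pattern.length - (k + 1) := by omega
  have hRlen : ((pattern.drop (k + 1)).take (k + 1)).length = t := by
    simp only [List.length_take, List.length_drop]
    omega
  have hLlen : ((pattern.drop (k + 1 - t)).take t).length = t := by
    simp only [List.length_take, List.length_drop]
    omega
  constructor
  · intro h j hj
    have hcon := congrArg (fun l => l[t - 1 - j]?) h
    simp only at hcon
    rw [List.getElem?_take, if_pos (by omega), List.getElem?_drop,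
      List.getElem?_reverse (by rw [hRlen]; omega), hRlen,
      List.getElem?_take, if_pos (by omega), List.getElem?_drop] at hcon
    have e1 : k + 1 - t + (t - 1 - j) = k - j := by omega
    have e2 : k + 1 + (t - 1 - (t - 1 - j)) = k + 1 + j := by omega
    rw [e1, e2] at hcon
    exact hcon
  · intro h
    apply List.ext_getElem?
    intro i
    by_cases hi : i < t
    · rw [List.getElem?_take, if_pos (by omega), List.getElem?_drop,
        List.getElem?_reverse (by rw [hRlen]; omega), hRlen,
        List.getElem?_take, if_pos (by omega), List.getElem?_drop]
      have hx := h (t - 1 - i) (by omega)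
      have e1 : k + 1 - t + i = k - (t - 1 - i) := by omega
      rw [e1, hx]
    · rw [List.getElem?_eq_none (by rw [hLlen]; omega),
        List.getElem?_eq_none (by rw [List.length_reverse, hRlen]; omega)]

-- ===== VERDICT (by name: the statement is the Claim_ definition above) =====
theorem horizLine_spec : Claim_equal_horizLine := by
  unfold Claim_equal_horizLine
  intro pattern _
  unfold Spec_horizLine
  simp only [horizLine, horizLine_alt]
  rw [PySem.List.foldl_append_if_eq_filter (fun i => horizAux pattern i (i + 1) true)]
  rw [List.nil_append]
  apply List.filter_congr
  intro i hi
  rw [PySem.List.mem_pyRange_one] at hi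
  obtain ⟨hi0, hin⟩ := hi
  obtain ⟨k, rfl⟩ : ∃ m : ℕ, i = (m : Int) := ⟨i.toNat, by omega⟩
  have hkn : k + 1 < pattern.length := by omega
  rw [Bool.eq_iff_iff]
  have hc : ((k : ℕ) : Int) + 1 = ((k + 1 : ℕ) : Int) := by push_cast; ring
  rw [hc]
  have hA := horizAux_true_iff pattern (pattern.length - (k + 1)) k (k + 1) rfl
  set t := min (k + 1) (pattern.length - (k + 1)) with ht
  have ha : (max 0 (2 * ((k : ℕ) : Int) + 2 - (pattern.length : Int))).toNat = k + 1 - t := by omega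
  have hb1 : (((k + 1 : ℕ) : Int)).toNat = k + 1 := by omega
  have hb2 : (2 * ((k : ℕ) : Int) + 2).toNat = 2 * k + 2 := by omega
  rw [PySem.List.slice_toNat pattern (by omega) (by omega),
      PySem.List.slice_toNat pattern (by omega) (by omega)]
  rw [ha, hb1, hb2]
  have htake1 : k + 1 - (k + 1 - t) = t := by omega
  have htake2 : 2 * k + 2 - (k + 1) = k + 1 := by omega
  rw [htake1, htake2, beq_iff_eq, hA, slice_pair_iff pattern k hkn]
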